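-- pv_equiv track=rewrite | github.com/Scoreboard-Central/rolling-america-pwa | solver.py | evaluate
-- ===== SOURCE A (Python) =====
-- def evaluate(grid, targets):
--     adj = {}
--     for y in range(len(grid)):
--         for x in range(len(grid[0])):
--             s1 = grid[y][x]
--             if s1 == '.': continue
--             if s1 not in adj: adj[s1] = set()
--             for dx, dy in [(1,0), (-1,0), (0,1), (0,-1)]:
--                 nx, ny = x+dx, y+dy
--                 if 0 <= nx < len(grid[0]) and 0 <= ny < len(grid):
--                     s2 = grid[ny][nx]
--                     if s2 != '.' and s2 != s1:
--                         adj[s1].add(s2)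
--     score = 0
--     for s, t in targets.items():
--         score += abs(len(adj.get(s, [])) - t)
--     return score, adj
-- ===== SOURCE B (Python) =====
-- def evaluate(grid, targets):
--     h, w = len(grid), len(grid[0])
--
--     def contribs(y, x):
--         # neighbour symbols of cell (y, x) that are not '.' and differ from it
--         s = grid[y][x]
--         return [grid[y + dy][x + dx]
--                 for dx, dy in ((1, 0), (-1, 0), (0, 1), (0, -1))
--                 if 0 <= x + dx < w and 0 <= y + dy < h
--                 and grid[y + dy][x + dx] != '.'
--                 and grid[y + dy][x + dx] != s]
--
--     cells = [(y, x) for y in range(h) for x in range(w) if grid[y][x] != '.']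
--     symbols = list(dict.fromkeys(grid[y][x] for y, x in cells))
--     adj = {s: set(n for y, x in cells if grid[y][x] == s for n in contribs(y, x))
--            for s in symbols}
--     return (sum(abs(len(adj.get(s, ())) - t) for s, t in targets.items()), adj)
-- ===== Notes on version B (the rewrite author's own statement) =====
-- stated objective: alternative
-- what changed: A builds the adjacency dict imperatively in one nested scan, mutating per-cell; B first lists the non-'.' cells, dedups their symbols with dict.fromkeys, then builds adj declaratively as a dict comprehension grouping each symbol's neighbour contributions, and scores with a sum() generator instead of an accumulator loop.
-- outside the precondition, e.g. on evaluate([], {}): A returns (0, {}), B raises IndexError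
import Mathlib
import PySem

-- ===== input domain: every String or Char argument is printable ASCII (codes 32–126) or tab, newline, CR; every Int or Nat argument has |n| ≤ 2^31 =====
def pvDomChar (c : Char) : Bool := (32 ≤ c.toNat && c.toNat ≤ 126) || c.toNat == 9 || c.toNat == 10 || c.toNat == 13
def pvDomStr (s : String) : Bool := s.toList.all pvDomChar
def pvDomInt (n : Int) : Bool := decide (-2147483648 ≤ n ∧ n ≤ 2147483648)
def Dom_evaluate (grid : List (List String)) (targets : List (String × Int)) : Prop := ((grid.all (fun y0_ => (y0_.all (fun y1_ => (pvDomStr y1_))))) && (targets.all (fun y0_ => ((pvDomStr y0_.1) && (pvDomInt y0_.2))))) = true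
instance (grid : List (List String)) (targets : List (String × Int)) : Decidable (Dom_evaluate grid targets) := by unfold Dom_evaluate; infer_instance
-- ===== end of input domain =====

-- B replaces A's imperative dict-mutating scan by a declarative group-by-symbol construction
-- (dedup the symbols, then one comprehension per symbol); objective: alternative decomposition.

-- grid[y][x]; always in range where the ports are evaluated under Pre_evaluate
def pvCell (grid : List (List String)) (y x : Nat) : String :=
  (grid.getD y []).getD x ""

-- ===== PORT A =====
def evaluate (grid : List (List String)) (targets : List (String × Int)) : Int × (List (String × List String)) :=
  let h := grid.length
  let w := (grid.headD []).length   -- len(grid[0]); grid ≠ [] under Pre_evaluate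
  let adj : PySem.Dict String (PySem.Set String) :=
    (List.range h).foldl (fun adj y =>
      (List.range w).foldl (fun adj x =>
        let s1 := pvCell grid y x
        if s1 = "." then adj
        else
          let adj := if adj.contains s1 then adj else adj.insert s1 PySem.Set.empty
          [((1:Int),(0:Int)), (-1,0), (0,1), (0,-1)].foldl (fun adj d =>
            let nx := (x:Int) + d.1
            let ny := (y:Int) + d.2
            if 0 ≤ nx ∧ nx < (w:Int) ∧ 0 ≤ ny ∧ ny < (h:Int) then
              let s2 := pvCell grid ny.toNat nx.toNat
              if s2 ≠ "." ∧ s2 ≠ s1 then adj.modify s1 PySem.Set.empty (fun st => PySem.Set.add st s2)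
              else adj
            else adj) adj) adj) PySem.Dict.empty
  let score : Int := targets.foldl (fun score p =>
    score + |(((adj.get? p.1).getD PySem.Set.empty).length : Int) - p.2|) 0
  (score, adj.items)

-- ===== PORT B =====
-- contribs(y, x) from Source B: the filtered neighbour-symbol comprehension
def pvContribs (grid : List (List String)) (w h : Nat) (y x : Nat) : List String :=
  let s := pvCell grid y x
  [((1:Int),(0:Int)), (-1,0), (0,1), (0,-1)].filterMap (fun d =>
    if 0 ≤ (x:Int) + d.1 ∧ (x:Int) + d.1 < (w:Int) ∧ 0 ≤ (y:Int) + d.2 ∧ (y:Int) + d.2 < (h:Int) then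
      let n := pvCell grid ((y:Int) + d.2).toNat ((x:Int) + d.1).toNat
      if n ≠ "." ∧ n ≠ s then some n else none
    else none)

def evaluate_alt (grid : List (List String)) (targets : List (String × Int)) : Int × (List (String × List String)) :=
  let h := grid.length
  let w := (grid.headD []).length
  let cells := ((List.range h).flatMap (fun y => (List.range w).map (fun x => (y, x)))).filter
      (fun c => decide (pvCell grid c.1 c.2 ≠ "."))
  let symbols := PySem.List.dedup (cells.map (fun c => pvCell grid c.1 c.2))
  -- the dict comprehension: keys are the deduped symbols, values the grouped neighbour sets
  let adj : List (String × List String) := symbols.map (fun s =>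
      (s, PySem.Set.ofList ((cells.filter (fun c => pvCell grid c.1 c.2 == s)).flatMap
            (fun c => pvContribs grid w h c.1 c.2))))
  let score : Int := (targets.map (fun p => |(((adj.lookup p.1).getD []).length : Int) - p.2|)).sum
  (score, adj)

-- ===== PRECONDITION & SPEC =====
-- Pre_ excludes ragged grids with a row shorter than row 0, where the Python A raises
-- IndexError, and the empty grid, where A happens to return (0, {}) only because its loop
-- body (and hence len(grid[0])) is never reached, while B evaluates len(grid[0]) and raises.
def Pre_evaluate (grid : List (List String)) (targets : List (String × Int)) : Prop :=
  grid ≠ [] ∧ ∀ row ∈ grid, (grid.headD []).length ≤ row.length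
instance (grid : List (List String)) (targets : List (String × Int)) : Decidable (Pre_evaluate grid targets) := by unfold Pre_evaluate; infer_instance
def pvWitness_evaluate : List (List String) × (List (String × Int)) :=
  ([["a", "b"], [".", "a"]], [("a", 1), ("c", 0)])

def Spec_evaluate (grid : List (List String)) (targets : List (String × Int)) (out : Int × (List (String × List String))) : Prop := out = evaluate_alt grid targets
instance (grid : List (List String)) (targets : List (String × Int)) (out : Int × (List (String × List String))) : Decidable (Spec_evaluate grid targets out) := by unfold Spec_evaluate; infer_instance

-- ===== CLAIM (what is proved, stated in full; the proofs are below) =====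
def Claim_equal_evaluate : Prop := ∀ (grid : List (List String)) (targets : List (String × Int)), Dom_evaluate grid targets → Pre_evaluate grid targets → Spec_evaluate grid targets (evaluate grid targets)

-- ===== LEMMAS AND PROOFS =====

-- A's per-cell action in collapsed form
def pvStep (grid : List (List String)) (w h : Nat)
    (adj : PySem.Dict String (PySem.Set String)) (c : Nat × Nat) : PySem.Dict String (PySem.Set String) :=
  (pvContribs grid w h c.1 c.2).foldl
    (fun adj n => adj.modify (pvCell grid c.1 c.2) [] (fun st => PySem.Set.add st n))
    (if adj.contains (pvCell grid c.1 c.2) then adj else adj.insert (pvCell grid c.1 c.2) [])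

-- a dict whose items are a list of keys paired with a value function
def pvMkD (K : List String) (v : String → PySem.Set String) : PySem.Dict String (PySem.Set String) :=
  ⟨K.map (fun s => (s, v s))⟩

lemma pv_foldl2 {α : Type} (l₁ l₂ : List Nat) (f : α → Nat → Nat → α) (init : α) :
    l₁.foldl (fun a y => l₂.foldl (fun a x => f a y x) a) init
      = (l₁.flatMap (fun y => l₂.map (fun x => (y, x)))).foldl (fun a c => f a c.1 c.2) init := by
  induction l₁ generalizing init with
  | nil => rfl
  | cons y t ih => simp [List.foldl_append, List.foldl_map, ih]

lemma pv_mkD_congr (K : List String) (v v' : String → PySem.Set String)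
    (h : ∀ s ∈ K, v s = v' s) : pvMkD K v = pvMkD K v' := by
  unfold pvMkD
  exact congrArg _ (List.map_congr_left (fun s hs => by rw [h s hs]))

lemma pv_contains (K : List String) (v : String → PySem.Set String) (k : String) :
    (pvMkD K v).contains k = decide (k ∈ K) := by
  simp only [pvMkD, PySem.Dict.contains, List.any_map, Function.comp_def]
  induction K with
  | nil => simp
  | cons s K ih =>
    by_cases h : s = k
    · simp [h, ih]
    · simp only [List.any_cons, ih, List.mem_cons]
      rw [beq_false_of_ne h, Bool.false_or]
      exact (decide_eq_decide.mpr (by tauto)).symm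

lemma pv_get? (K : List String) (v : String → PySem.Set String) (k : String) :
    (pvMkD K v).get? k = if k ∈ K then some (v k) else none := by
  induction K with
  | nil => simp [pvMkD, PySem.Dict.get?]
  | cons s K ih =>
    by_cases h : s = k
    · subst h; simp [pvMkD, PySem.Dict.get?_mk_cons]
    · simp only [pvMkD, List.map_cons, PySem.Dict.get?_mk_cons]
      rw [if_neg (by simp [h])]
      simpa [pvMkD, List.mem_cons, h, Ne.symm h] using ih

lemma pv_lookup (K : List String) (v : String → PySem.Set String) (k : String) :
    (K.map (fun s => (s, v s))).lookup k = if k ∈ K then some (v k) else none := by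
  induction K with
  | nil => simp
  | cons s K ih =>
    by_cases h : s = k
    · subst h; simp [List.lookup]
    · have hb : (k == s) = false := by simp [Ne.symm h]
      simp [List.lookup, hb, ih, Ne.symm h]

lemma pv_insert_mem (K : List String) (v : String → PySem.Set String) (k : String)
    (hk : k ∈ K) (w : PySem.Set String) :
    (pvMkD K v).insert k w = pvMkD K (fun s => if s = k then w else v s) := by
  unfold PySem.Dict.insert
  rw [pv_contains, if_pos (by simpa using hk)]
  unfold pvMkD
  refine congrArg _ ?_
  rw [List.map_map]
  refine List.map_congr_left (fun s _ => ?_)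
  by_cases h : s = k <;> simp [h]

lemma pv_insert_fresh (K : List String) (v : String → PySem.Set String) (k : String)
    (hk : k ∉ K) (w : PySem.Set String) :
    (pvMkD K v).insert k w = pvMkD (K ++ [k]) (fun s => if s = k then w else v s) := by
  unfold PySem.Dict.insert
  rw [pv_contains, if_neg (by simpa using hk)]
  unfold pvMkD
  refine congrArg _ ?_
  rw [List.map_append, List.map_singleton]
  refine congrArg₂ (· ++ ·) ?_ (by simp)
  refine List.map_congr_left (fun s hs => ?_)
  simp only []
  rw [if_neg (by rintro rfl; exact hk hs)]

lemma pv_modfold (K : List String) (v : String → PySem.Set String) (k : String)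
    (hk : k ∈ K) (ns : List String) :
    ns.foldl (fun d n => d.modify k [] (fun st => PySem.Set.add st n)) (pvMkD K v)
      = pvMkD K (fun s => if s = k then PySem.Set.update (v k) ns else v s) := by
  induction ns generalizing v with
  | nil =>
    simp only [List.foldl_nil]
    refine (pv_mkD_congr _ _ _ (fun s _ => ?_)).symm
    by_cases h : s = k <;> simp [h, PySem.Set.update]
  | cons n ns ih =>
    simp only [List.foldl_cons]
    rw [show (pvMkD K v).modify k [] (fun st => PySem.Set.add st n)
          = pvMkD K (fun s => if s = k then PySem.Set.add (v k) n else v s) by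
        unfold PySem.Dict.modify
        rw [PySem.Dict.getD_eq_get?_getD, pv_get?, if_pos hk]
        exact pv_insert_mem K v k hk _]
    rw [ih (fun s => if s = k then PySem.Set.add (v k) n else v s)]
    refine pv_mkD_congr _ _ _ (fun s _ => ?_)
    by_cases h : s = k <;> simp [h, PySem.Set.update]

-- A's collapsed fold over the non-'.' cells builds exactly B's grouped dict
lemma pv_ofList_append (a b : List String) :
    PySem.Set.ofList (a ++ b) = PySem.Set.update (PySem.Set.ofList a) b := by
  simp [PySem.Set.ofList, PySem.Set.update, List.foldl_append]

lemma pv_adj_inv (grid : List (List String)) (w h : Nat) (cs : List (Nat × Nat)) :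
    cs.foldl (pvStep grid w h) PySem.Dict.empty
      = pvMkD (PySem.Set.ofList (cs.map (fun c => pvCell grid c.1 c.2)))
          (fun s => PySem.Set.ofList ((cs.filter (fun c => pvCell grid c.1 c.2 == s)).flatMap
              (fun c => pvContribs grid w h c.1 c.2))) := by
  induction cs using List.reverseRecOn with
  | nil => rfl
  | append_singleton cs c ih =>
    rw [List.foldl_append, List.foldl_cons, List.foldl_nil, ih]
    have hofl : PySem.Set.ofList ((cs ++ [c]).map (fun c' => pvCell grid c'.1 c'.2))
        = PySem.Set.add (PySem.Set.ofList (cs.map (fun c' => pvCell grid c'.1 c'.2)))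
            (pvCell grid c.1 c.2) := by
      simp [PySem.Set.ofList, List.foldl_append]
    rw [hofl]
    have hfil : ∀ s : String, ((cs ++ [c]).filter (fun c' => pvCell grid c'.1 c'.2 == s))
        = cs.filter (fun c' => pvCell grid c'.1 c'.2 == s)
          ++ (if pvCell grid c.1 c.2 = s then [c] else []) := by
      intro s; simp [List.filter_append, List.filter_cons]
    by_cases hmem : pvCell grid c.1 c.2 ∈ PySem.Set.ofList (cs.map (fun c' => pvCell grid c'.1 c'.2))
    · -- the symbol is already a key
      have hadd : PySem.Set.add (PySem.Set.ofList (cs.map (fun c' => pvCell grid c'.1 c'.2)))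
          (pvCell grid c.1 c.2) = PySem.Set.ofList (cs.map (fun c' => pvCell grid c'.1 c'.2)) := by
        simp [PySem.Set.add, PySem.Set.contains, hmem]
      rw [hadd]
      unfold pvStep
      rw [pv_contains, if_pos (by simpa using hmem), pv_modfold _ _ _ hmem]
      refine pv_mkD_congr _ _ _ (fun s hs => ?_)
      by_cases hske : s = pvCell grid c.1 c.2
      · subst hske
        rw [if_pos rfl, hfil _, if_pos rfl]
        rw [List.flatMap_append, pv_ofList_append]
        simp
      · rw [if_neg hske, hfil s, if_neg (fun hh => hske hh.symm)]
        simp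
    · -- fresh symbol: key is appended
      have hadd : PySem.Set.add (PySem.Set.ofList (cs.map (fun c' => pvCell grid c'.1 c'.2)))
          (pvCell grid c.1 c.2)
          = PySem.Set.ofList (cs.map (fun c' => pvCell grid c'.1 c'.2)) ++ [pvCell grid c.1 c.2] := by
        simp [PySem.Set.add, PySem.Set.contains, hmem]
      rw [hadd]
      unfold pvStep
      rw [pv_contains, if_neg (by simpa using hmem), pv_insert_fresh _ _ _ (by simpa using hmem),
        pv_modfold _ _ _ (by simp)]
      have hnofil : cs.filter (fun c' => pvCell grid c'.1 c'.2 == pvCell grid c.1 c.2) = [] := by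
        refine List.filter_eq_nil_iff.mpr (fun c' hc' => ?_)
        have : pvCell grid c'.1 c'.2 ∈ cs.map (fun c' => pvCell grid c'.1 c'.2) :=
          List.mem_map_of_mem hc'
        simp only [beq_iff_eq]
        intro hccontra
        exact hmem ((PySem.Set.mem_ofList _ _).mpr (hccontra ▸ this))
      refine pv_mkD_congr _ _ _ (fun s hs => ?_)
      by_cases hske : s = pvCell grid c.1 c.2
      · subst hske
        rw [if_pos rfl, if_pos rfl, hfil _, if_pos rfl, hnofil]
        simp [PySem.Set.ofList, PySem.Set.update]
      · rw [if_neg hske, if_neg hske, hfil s, if_neg (fun hh => hske hh.symm)]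
        simp

-- A's four-direction guarded loop is the fold of pvContribs
lemma pv_inner (grid : List (List String)) (w h y x : Nat) (s1 : String)
    (hs : s1 = pvCell grid y x) (adj : PySem.Dict String (PySem.Set String)) :
    [((1:Int),(0:Int)), (-1,0), (0,1), (0,-1)].foldl (fun adj d =>
        if 0 ≤ (x:Int) + d.1 ∧ (x:Int) + d.1 < (w:Int) ∧ 0 ≤ (y:Int) + d.2 ∧ (y:Int) + d.2 < (h:Int) then
          if pvCell grid ((y:Int) + d.2).toNat ((x:Int) + d.1).toNat ≠ "." ∧
             pvCell grid ((y:Int) + d.2).toNat ((x:Int) + d.1).toNat ≠ s1 then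
            adj.modify s1 [] (fun st => PySem.Set.add st (pvCell grid ((y:Int) + d.2).toNat ((x:Int) + d.1).toNat))
          else adj
        else adj) adj
      = (pvContribs grid w h y x).foldl (fun adj n => adj.modify s1 [] (fun st => PySem.Set.add st n)) adj := by
  subst hs
  rw [pvContribs, List.foldl_filterMap]
  refine PySem.List.foldl_congr_mem _ _ _ _ (fun acc d _ => ?_)
  by_cases hb : 0 ≤ (x:Int) + d.1 ∧ (x:Int) + d.1 < (w:Int) ∧ 0 ≤ (y:Int) + d.2 ∧ (y:Int) + d.2 < (h:Int)
  · simp only [if_pos hb]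
    by_cases hn : pvCell grid ((y:Int) + d.2).toNat ((x:Int) + d.1).toNat ≠ "." ∧
        pvCell grid ((y:Int) + d.2).toNat ((x:Int) + d.1).toNat ≠ pvCell grid y x
    · simp [hn]
    · simp [hn]
  · simp [hb]

-- A's whole nested loop, collapsed to the grouped dict
lemma pv_Afold (grid : List (List String)) :
    (List.range grid.length).foldl (fun adj y =>
      (List.range (grid.headD []).length).foldl (fun adj x =>
        let s1 := pvCell grid y x
        if s1 = "." then adj
        else
          let adj := if adj.contains s1 then adj else adj.insert s1 PySem.Set.empty
          [((1:Int),(0:Int)), (-1,0), (0,1), (0,-1)].foldl (fun adj d =>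
            let nx := (x:Int) + d.1
            let ny := (y:Int) + d.2
            if 0 ≤ nx ∧ nx < ((grid.headD []).length:Int) ∧ 0 ≤ ny ∧ ny < (grid.length:Int) then
              let s2 := pvCell grid ny.toNat nx.toNat
              if s2 ≠ "." ∧ s2 ≠ s1 then adj.modify s1 PySem.Set.empty (fun st => PySem.Set.add st s2)
              else adj
            else adj) adj) adj) PySem.Dict.empty
    = pvMkD (PySem.Set.ofList ((((List.range grid.length).flatMap
            (fun y => (List.range (grid.headD []).length).map (fun x => (y, x)))).filter
            (fun c => decide (pvCell grid c.1 c.2 ≠ "."))).map (fun c => pvCell grid c.1 c.2)))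
        (fun s => PySem.Set.ofList (((((List.range grid.length).flatMap
            (fun y => (List.range (grid.headD []).length).map (fun x => (y, x)))).filter
            (fun c => decide (pvCell grid c.1 c.2 ≠ "."))).filter
            (fun c => pvCell grid c.1 c.2 == s)).flatMap
            (fun c => pvContribs grid (grid.headD []).length grid.length c.1 c.2))) := by
  rw [pv_foldl2]
  rw [PySem.List.foldl_congr_mem _ _
    (fun adj c => if pvCell grid c.1 c.2 ≠ "." then
        pvStep grid (grid.headD []).length grid.length adj c else adj) _
    (fun adj c _ => by
      dsimp only
      by_cases hdot : pvCell grid c.1 c.2 = "."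
      · simp [hdot]
      · rw [if_neg hdot, if_pos hdot]
        exact pv_inner grid (grid.headD []).length grid.length c.1 c.2 _ rfl _)]
  exact (PySem.List.foldl_ite_eq_foldl_filter
      (fun c : Nat × Nat => pvCell grid c.1 c.2 ≠ ".")
      (pvStep grid (grid.headD []).length grid.length) _ _).trans
    (pv_adj_inv grid (grid.headD []).length grid.length _)

theorem pv_main (grid : List (List String)) (targets : List (String × Int)) :
    evaluate grid targets = evaluate_alt grid targets := by
  simp only [evaluate, evaluate_alt, PySem.List.dedup]
  rw [pv_Afold]
  refine Prod.ext ?_ ?_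
  · dsimp only
    rw [PySem.List.foldl_add]
    rw [zero_add]
    refine congrArg List.sum (List.map_congr_left (fun p _ => ?_))
    rw [pv_get?]
    rw [show ((PySem.Set.ofList
        (List.map (fun c => pvCell grid c.1 c.2)
          (List.filter (fun c => decide (pvCell grid c.1 c.2 ≠ "."))
            (List.flatMap (fun y => List.map (fun x => (y, x)) (List.range (grid.headD []).length))
              (List.range grid.length))))).map (fun s => (s, (fun s => PySem.Set.ofList
            (List.flatMap (fun c => pvContribs grid (grid.headD []).length grid.length c.1 c.2)
              (List.filter (fun c => pvCell grid c.1 c.2 == s)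
                (List.filter (fun c => decide (pvCell grid c.1 c.2 ≠ "."))
                  (List.flatMap (fun y => List.map (fun x => (y, x)) (List.range (grid.headD []).length))
                    (List.range grid.length)))))) s))).lookup p.1
      = _ from pv_lookup _ _ p.1]
    rfl
  · rfl

-- ===== VERDICT (by name: the statement is the Claim_ definition above) =====
theorem evaluate_spec : Claim_equal_evaluate := by
  intro grid targets _ _
  unfold Spec_evaluate
  exact pv_main grid targets
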